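-- pv_equiv track=rewrite | github.com/Panteralan/Buscaminas-Python | funciones9D.py | ObtenerAdyacentes
-- ===== SOURCE A (Python) =====
-- def ObtenerAdyacentes(tablero, fila, columna):
--     adyacentes = [] # posibles posiciones adyacentes
--     posiciones_adyacentes = [(-1,-1), (-1,0), (-1,1), (0,-1), (0,1), (1,-1), (1,0),
--     (1,1)]
--     for posicion in posiciones_adyacentes:
--         posible_fila = fila + posicion[0]
--         posible_columna = columna + posicion[1]
--         if (EsValidaPosicion(tablero, posible_fila, posible_columna)):
--             adyacentes.append((posible_fila, posible_columna))
--     return (adyacentes)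
--
-- def EsValidaPosicion(tablero, fila, columna):
--     tamanio = len(tablero)
--     es_valida = False
--     if (0 <= fila) and (fila < tamanio):
--         if (0 <= columna) and (columna < tamanio):
--             es_valida = True
--     return (es_valida)
-- ===== SOURCE B (Python) =====
-- def ObtenerAdyacentes(tablero, fila, columna):
--     tamanio = len(tablero)
--     adyacentes = []
--     for f in range(max(0, fila - 1), min(tamanio, fila + 2)):
--         for c in range(max(0, columna - 1), min(tamanio, columna + 2)):
--             if f != fila or c != columna:
--                 adyacentes.append((f, c))
--     return adyacentes
-- ===== Notes on version B (the rewrite author's own statement) =====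
-- stated objective: simpler
-- what changed: Replaced the 8-offset candidate list plus per-candidate EsValidaPosicion bounds check by two clipped range() loops (max/min window) that iterate only over in-bounds neighbours, skipping the center cell.
import Mathlib
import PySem

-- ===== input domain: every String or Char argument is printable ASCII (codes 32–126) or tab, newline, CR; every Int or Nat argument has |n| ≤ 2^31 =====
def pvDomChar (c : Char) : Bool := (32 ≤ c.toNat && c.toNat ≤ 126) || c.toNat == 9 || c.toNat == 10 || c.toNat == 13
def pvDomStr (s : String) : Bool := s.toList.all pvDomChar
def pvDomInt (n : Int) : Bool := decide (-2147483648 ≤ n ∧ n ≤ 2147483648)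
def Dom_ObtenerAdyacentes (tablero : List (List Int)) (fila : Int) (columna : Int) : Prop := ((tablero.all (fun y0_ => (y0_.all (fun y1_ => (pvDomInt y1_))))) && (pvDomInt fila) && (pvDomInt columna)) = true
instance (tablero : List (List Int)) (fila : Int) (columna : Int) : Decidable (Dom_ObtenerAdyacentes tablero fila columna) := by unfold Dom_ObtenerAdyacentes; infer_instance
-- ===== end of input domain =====

-- B replaces the 8-offset candidate list + per-candidate bounds check by two
-- range loops clipped with max/min, iterating only over in-bounds neighbours
-- (objective: simpler).

-- ===== PORT A =====
def EsValidaPosicion (tablero : List (List Int)) (fila : Int) (columna : Int) : Bool :=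
  let tamanio : Int := tablero.length
  let es_valida := false
  let es_valida :=
    if 0 ≤ fila ∧ fila < tamanio then
      if 0 ≤ columna ∧ columna < tamanio then true else es_valida
    else es_valida
  es_valida

def ObtenerAdyacentes (tablero : List (List Int)) (fila : Int) (columna : Int) : List (Int × Int) :=
  let posiciones_adyacentes : List (Int × Int) :=
    [(-1,-1), (-1,0), (-1,1), (0,-1), (0,1), (1,-1), (1,0), (1,1)]
  posiciones_adyacentes.foldl (fun adyacentes posicion =>
    let posible_fila := fila + posicion.1
    let posible_columna := columna + posicion.2
    if EsValidaPosicion tablero posible_fila posible_columna then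
      adyacentes ++ [(posible_fila, posible_columna)]
    else adyacentes) []

-- ===== PORT B =====
def ObtenerAdyacentes_alt (tablero : List (List Int)) (fila : Int) (columna : Int) : List (Int × Int) :=
  let tamanio : Int := tablero.length
  (PySem.List.pyRange (max 0 (fila - 1)) (min tamanio (fila + 2)) 1).foldl (fun adyacentes f =>
    (PySem.List.pyRange (max 0 (columna - 1)) (min tamanio (columna + 2)) 1).foldl (fun adyacentes c =>
      if f ≠ fila ∨ c ≠ columna then adyacentes ++ [(f, c)] else adyacentes) adyacentes) []

-- ===== PRECONDITION & SPEC =====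
def Spec_ObtenerAdyacentes (tablero : List (List Int)) (fila : Int) (columna : Int) (out : List (Int × Int)) : Prop := out = ObtenerAdyacentes_alt tablero fila columna
instance (tablero : List (List Int)) (fila : Int) (columna : Int) (out : List (Int × Int)) : Decidable (Spec_ObtenerAdyacentes tablero fila columna out) := by unfold Spec_ObtenerAdyacentes; infer_instance

-- ===== CLAIM (what is proved, stated in full; the proofs are below) =====
def Claim_equal_ObtenerAdyacentes : Prop := ∀ (tablero : List (List Int)) (fila : Int) (columna : Int), Dom_ObtenerAdyacentes tablero fila columna → Spec_ObtenerAdyacentes tablero fila columna (ObtenerAdyacentes tablero fila columna)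

-- ===== LEMMAS AND PROOFS =====

-- The clipped range of B enumerates exactly the in-bounds members of [a-1, a, a+1].
theorem pv_range3 (n a : Int) :
    PySem.List.pyRange (max 0 (a - 1)) (min n (a + 2)) 1 =
      List.filter (fun x => decide (0 ≤ x ∧ x < n)) [a - 1, a, a + 1] := by
  have hperm : (List.filter (fun x => decide (0 ≤ x ∧ x < n)) [a - 1, a, a + 1]).Perm
      (PySem.List.pyRange (max 0 (a - 1)) (min n (a + 2)) 1) := by
    rw [List.perm_ext_iff_of_nodup]
    · intro x
      simp [List.mem_filter, PySem.List.mem_pyRange_one]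
      omega
    · apply List.Nodup.filter
      simp
      omega
    · exact PySem.List.nodup_pyRange_one _ _
  refine PySem.List.eq_of_perm_of_pairwise_le_of_injective (fun x : Int => x)
    (fun _ _ h => h) hperm.symm ?_ ?_
  · exact (PySem.List.pairwise_lt_pyRange_one _ _).imp (fun h => le_of_lt h)
  · apply List.Pairwise.filter
    simp [List.pairwise_cons]
    omega

-- EsValidaPosicion is the conjunction of the two bounds checks.
theorem pv_esvalida (t : List (List Int)) (a b : Int) :
    EsValidaPosicion t a b =
      ((decide (0 ≤ a ∧ a < (t.length : Int))) && (decide (0 ≤ b ∧ b < (t.length : Int)))) := by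
  unfold EsValidaPosicion
  dsimp only
  split_ifs with h1 h2 <;> simp_all

-- A's offset walk equals B's nested walk over the filtered windows, for ANY
-- row/column predicates p and q (both are row-major over the 3×3 window minus
-- the centre).
theorem pv_core (p q : Int → Bool) (f c : Int) :
    (([(-1,-1), (-1,0), (-1,1), (0,-1), (0,1), (1,-1), (1,0), (1,1)] : List (Int × Int)).foldl
      (fun adyacentes posicion =>
        if p (f + posicion.1) && q (c + posicion.2) then
          adyacentes ++ [(f + posicion.1, c + posicion.2)]
        else adyacentes) []) =
    (List.filter p [f - 1, f, f + 1]).foldl (fun adyacentes r =>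
      (List.filter q [c - 1, c, c + 1]).foldl (fun adyacentes cc =>
        if r ≠ f ∨ cc ≠ c then adyacentes ++ [(r, cc)] else adyacentes) adyacentes) [] := by
  have ef1 : f + (-1 : Int) = f - 1 := by ring
  have ec1 : c + (-1 : Int) = c - 1 := by ring
  have n1 : f - 1 ≠ f := by omega
  have n2 : f + 1 ≠ f := by omega
  have n3 : c - 1 ≠ c := by omega
  have n4 : c + 1 ≠ c := by omega
  cases hp1 : p (f - 1) <;> cases hp2 : p f <;> cases hp3 : p (f + 1) <;>
  cases hq1 : q (c - 1) <;> cases hq2 : q c <;> cases hq3 : q (c + 1) <;>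
  simp [List.filter, List.foldl, ef1, ec1, n1, n2, n3, n4, hp1, hp2, hp3, hq1, hq2, hq3]

set_option maxHeartbeats 1000000 in
theorem ObtenerAdyacentes_spec : Claim_equal_ObtenerAdyacentes := by
  intro tablero fila columna _
  unfold Spec_ObtenerAdyacentes ObtenerAdyacentes ObtenerAdyacentes_alt
  simp only [pv_range3, pv_esvalida]
  exact pv_core (fun x => decide (0 ≤ x ∧ x < (tablero.length : Int)))
    (fun x => decide (0 ≤ x ∧ x < (tablero.length : Int))) fila columna
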